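-- pv_equiv track=rewrite | github.com/NguyenDinhHiep-b19dccn235/python-code-ptit | PY01058-ĐOẠN CUỐI NGUYÊN TỐ.py | dcuoi
-- ===== SOURCE A (Python) =====
-- def dcuoi(n):
--     n=str(n)
--     a=n[-4]+n[-3]+n[-2]+n[-1]
--     b=int(a)
--     x=1
--     y=0
--     while x<b:
--         x+=1
--         if b%x==0:
--             y+=1
--         else:
--             y+=0
--     if y==1:
--         return 1
--     else:
--         return 0
-- ===== SOURCE B (Python) =====
-- def dcuoi(n):
--     b = int(str(n)[-4:])
--     if b < 2:
--         return 0
--     d = 2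
--     while d * d <= b:
--         if b % d == 0:
--             return 0
--         d += 1
--     return 1
-- ===== Notes on version B (the rewrite author's own statement) =====
-- stated objective: alternative
-- what changed: B replaces A's count-every-divisor-up-to-b loop (then test count==1) by an early-exit trial-division primality test up to sqrt(b) on b = int(str(n)[-4:]); b is bounded by the four-digit extraction, so a timing run cannot resolve the speed difference.
-- crash fix: On -99 <= n <= 999 (str(n) shorter than 4 characters) A raises IndexError; B slices with [-4:] and returns the primality indicator of int(str(n)) (0 for negatives and non-primes, 1 for primes). — e.g. on dcuoi(7): A raises IndexError, B returns 1
import Mathlib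
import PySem

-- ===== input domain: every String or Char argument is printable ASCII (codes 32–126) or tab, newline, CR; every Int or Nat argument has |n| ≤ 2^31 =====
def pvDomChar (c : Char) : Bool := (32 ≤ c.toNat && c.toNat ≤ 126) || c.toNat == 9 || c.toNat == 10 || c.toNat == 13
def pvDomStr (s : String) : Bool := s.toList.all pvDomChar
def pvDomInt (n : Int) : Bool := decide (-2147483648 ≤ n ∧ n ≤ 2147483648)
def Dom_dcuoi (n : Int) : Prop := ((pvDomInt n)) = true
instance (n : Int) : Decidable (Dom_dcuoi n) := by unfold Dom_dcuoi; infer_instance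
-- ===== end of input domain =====

-- B replaces A's count-all-divisors-up-to-b loop by an early-exit trial division up to sqrt(b); return value only.

-- ===== PORT A =====
-- while x < b: x += 1; y += 1 if b % x == 0 else 0   (fuel only makes the loop structural; it never runs out)
def dcuoiLoopA : Nat → Int → Int → Int → Int
  | 0, _, _, y => y
  | fuel + 1, b, x, y =>
    if x < b then
      dcuoiLoopA fuel b (x + 1) (if PySem.Int.mod b (x + 1) = 0 then y + 1 else y + 0)
    else y

def dcuoi (n : Int) : Int :=
  match PySem.List.pyGet? (PySem.Int.toChars n) (-4), PySem.List.pyGet? (PySem.Int.toChars n) (-3),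
        PySem.List.pyGet? (PySem.Int.toChars n) (-2), PySem.List.pyGet? (PySem.Int.toChars n) (-1) with
  | some c4, some c3, some c2, some c1 =>
    match PySem.Int.ofChars? [c4, c3, c2, c1] with
    | some b => if dcuoiLoopA (b - 1).toNat b 1 0 = 1 then 1 else 0
    | none => 0          -- int() ValueError: unreachable under Pre_
  | _, _, _, _ => 0      -- IndexError: excluded by Pre_

-- ===== PORT B =====
-- while d*d <= b: return 0 if b % d == 0 else d += 1; then return 1   (fuel is an upper bound on the trips)
def altLoopB : Nat → Int → Int → Int
  | 0, _, _ => 1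
  | fuel + 1, b, d =>
    if d * d ≤ b then
      if PySem.Int.mod b d = 0 then 0 else altLoopB fuel b (d + 1)
    else 1

def dcuoi_alt (n : Int) : Int :=
  match PySem.Int.ofChars? (PySem.List.slice (PySem.Int.toChars n) (some (-4)) none) with
  | some b => if b < 2 then 0 else altLoopB (b + 1).toNat b 2
  | none => 0

-- ===== PRECONDITION & SPEC =====
-- Pre_: str(n) has at least 4 characters (i.e. n ≥ 1000 or n ≤ -100); otherwise A raises IndexError.
def Pre_dcuoi (n : Int) : Prop := 4 ≤ (PySem.Int.toChars n).length
instance (n : Int) : Decidable (Pre_dcuoi n) := by unfold Pre_dcuoi; infer_instance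
def pvWitness_dcuoi : Int := 2024

-- On -99 ≤ n ≤ 999 (str(n) shorter than 4 characters) A raises IndexError; B's slice [-4:] clamps and B
-- returns the primality indicator of int(str(n)); made checkable by dcuoi_raises at the bottom.
def Raises_dcuoi (n : Int) : Prop := (PySem.Int.toChars n).length < 4
instance (n : Int) : Decidable (Raises_dcuoi n) := by unfold Raises_dcuoi; infer_instance
def pvRaiseWitness_dcuoi : Int := 7
def pvRaiseWitnessOut_dcuoi : Int := 1

def Spec_dcuoi (n : Int) (out : Int) : Prop := out = dcuoi_alt n
instance (n : Int) (out : Int) : Decidable (Spec_dcuoi n out) := by unfold Spec_dcuoi; infer_instance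

-- ===== CLAIM (what is proved, stated in full; the proofs are below) =====
def Claim_equal_dcuoi : Prop := ∀ (n : Int), Dom_dcuoi n → Pre_dcuoi n → Spec_dcuoi n (dcuoi n)
def Claim_raises_dcuoi : Prop := (∀ (n : Int), Dom_dcuoi n → Raises_dcuoi n → ¬ Pre_dcuoi n) ∧ (Dom_dcuoi (pvRaiseWitness_dcuoi) ∧ Raises_dcuoi (pvRaiseWitness_dcuoi) ∧ dcuoi_alt (pvRaiseWitness_dcuoi) = pvRaiseWitnessOut_dcuoi)

-- ===== LEMMAS AND PROOFS =====

-- A's loop adds to y the number of k with x < k ≤ m and m % k = 0.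
theorem loopA_eq_countP (m : Nat) : ∀ (fuel x : Nat) (y : Int), m ≤ x + fuel →
    dcuoiLoopA fuel (m : Int) (x : Int) y
      = y + ((List.range' (x + 1) (m - x)).countP (fun k => decide (m % k = 0)) : Int) := by
  intro fuel
  induction fuel with
  | zero =>
    intro x y h
    have h0 : m - x = 0 := by omega
    simp [dcuoiLoopA, h0]
  | succ f ih =>
    intro x y h
    by_cases hx : x < m
    · have hxz : ((x : Int) < (m : Int)) := by exact_mod_cast hx
      have hcast : (x : Int) + 1 = ((x + 1 : Nat) : Int) := by push_cast; ring
      rw [dcuoiLoopA, if_pos hxz, hcast, PySem.Int.mod_natCast,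
        ih (x + 1) _ (by omega)]
      have hsp : m - x = (m - (x + 1)) + 1 := by omega
      rw [hsp, List.range'_succ, List.countP_cons]
      by_cases hm : m % (x + 1) = 0
      · rw [if_pos (by exact_mod_cast hm)]
        simp [hm]; ring
      · rw [if_neg (by exact_mod_cast hm)]
        simp [hm]
    · have hxz : ¬ ((x : Int) < (m : Int)) := by exact_mod_cast hx
      have h0 : m - x = 0 := by omega
      rw [dcuoiLoopA, if_neg hxz, h0]
      simp

-- the count of divisors of m in [2, m] is 1 exactly when m is prime (m ≥ 2)
theorem countP_div_one_iff (m : Nat) (hm : 2 ≤ m) :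
    (List.range' 2 (m - 1)).countP (fun k => decide (m % k = 0)) = 1 ↔ Nat.Prime m := by
  have hsp : m - 1 = (m - 2) + 1 := by omega
  have hlast : 2 + 1 * (m - 2) = m := by omega
  rw [hsp, List.range'_concat, List.countP_append, hlast]
  have hmm : (List.countP (fun k => decide (m % k = 0)) [m]) = 1 := by
    simp [Nat.mod_self]
  rw [hmm]
  constructor
  · intro h
    have hz : List.countP (fun k => decide (m % k = 0)) (List.range' 2 (m - 2)) = 0 := by omega
    rw [List.countP_eq_zero] at hz
    refine Nat.prime_def_lt'.mpr ⟨hm, fun k hk2 hkm hdvd => ?_⟩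
    have hmem : k ∈ List.range' 2 (m - 2) := by
      rw [List.mem_range'_1]; omega
    have := hz k hmem
    simp only [decide_eq_true_eq] at this
    exact this (Nat.dvd_iff_mod_eq_zero.mp hdvd)
  · intro hp
    have hz : List.countP (fun k => decide (m % k = 0)) (List.range' 2 (m - 2)) = 0 := by
      rw [List.countP_eq_zero]
      intro k hmem
      rw [List.mem_range'_1] at hmem
      simp only [decide_eq_true_eq]
      intro hmod
      exact (Nat.prime_def_lt'.mp hp).2 k (by omega) (by omega)
        (Nat.dvd_iff_mod_eq_zero.mpr hmod)
    omega

-- B's loop result is always 0 or 1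
theorem altLoopB_zero_or_one : ∀ (fuel : Nat) (b d : Int),
    altLoopB fuel b d = 0 ∨ altLoopB fuel b d = 1 := by
  intro fuel
  induction fuel with
  | zero => intro b d; right; rfl
  | succ f ih =>
    intro b d
    rw [altLoopB]
    split_ifs with h1 h2
    · left; rfl
    · exact ih b (d + 1)
    · right; rfl

-- B's loop returns 1 iff no trial divisor k ≥ d with k*k ≤ m divides m (with enough fuel)
theorem altLoopB_one_iff (m : Nat) : ∀ (fuel d : Nat), 1 ≤ d → m + 1 ≤ fuel + d →
    (altLoopB fuel (m : Int) (d : Int) = 1 ↔ ∀ k, d ≤ k → k * k ≤ m → m % k ≠ 0) := by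
  intro fuel
  induction fuel with
  | zero =>
    intro d hd hfd
    simp only [altLoopB, true_iff]
    intro k hk hkk
    exfalso
    have : k ≤ k * k := Nat.le_mul_of_pos_left k (by omega)
    omega
  | succ f ih =>
    intro d hd hfd
    rw [altLoopB]
    by_cases hdd : d * d ≤ m
    · rw [if_pos (by exact_mod_cast hdd), PySem.Int.mod_natCast]
      by_cases hmod : m % d = 0
      · rw [if_pos (by exact_mod_cast hmod)]
        constructor
        · intro h; exact absurd h (by norm_num)
        · intro h; exact absurd hmod (h d le_rfl hdd)
      · have hcast : (d : Int) + 1 = ((d + 1 : Nat) : Int) := by push_cast; ring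
        rw [if_neg (by exact_mod_cast hmod), hcast,
          ih (d + 1) (by omega) (by omega)]
        constructor
        · intro h k hk hkk
          rcases Nat.lt_or_ge d k with h1 | h1
          · exact h k (by omega) hkk
          · have : k = d := by omega
            subst this; exact hmod
        · intro h k hk hkk
          exact h k (by omega) hkk
    · rw [if_neg (by exact_mod_cast hdd)]
      simp only [true_iff]
      intro k hk hkk
      exfalso
      have : d * d ≤ k * k := Nat.mul_le_mul hk hk
      omega

-- for b ≤ 1 A's loop never runs
theorem loopA_low (b : Int) (hb : b < 2) (fuel : Nat) : dcuoiLoopA fuel b 1 0 = 0 := by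
  cases fuel with
  | zero => rfl
  | succ f => rw [dcuoiLoopA, if_neg (by omega)]

-- the two loop tails agree for every b
theorem tail_eq (b : Int) :
    (if dcuoiLoopA (b - 1).toNat b 1 0 = 1 then (1 : Int) else 0)
      = (if b < 2 then 0 else altLoopB (b + 1).toNat b 2) := by
  by_cases hb : b < 2
  · rw [if_pos hb, loopA_low b hb]
    norm_num
  · rw [not_lt] at hb
    obtain ⟨m, rfl⟩ : ∃ m : Nat, b = (m : Int) := ⟨b.toNat, by omega⟩
    have hm2 : 2 ≤ m := by exact_mod_cast hb
    have hf1 : ((m : Int) - 1).toNat = m - 1 := by omega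
    have hf2 : ((m : Int) + 1).toNat = m + 1 := by omega
    have hone : (1 : Int) = ((1 : Nat) : Int) := by norm_num
    have htwo : (2 : Int) = ((2 : Nat) : Int) := by norm_num
    rw [if_neg (by omega : ¬ ((m : Int) < 2)), hf1, hf2]
    have hA : dcuoiLoopA (m - 1) (m : Int) 1 0
        = ((List.range' 2 (m - 1)).countP (fun k => decide (m % k = 0)) : Int) := by
      rw [hone, loopA_eq_countP m (m - 1) 1 0 (by omega)]
      norm_num
    have hB := altLoopB_one_iff m (m + 1) 2 (by omega) (by omega)
    rw [← htwo] at hB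
    rw [hA]
    by_cases hp : Nat.Prime m
    · have h1 : (List.range' 2 (m - 1)).countP (fun k => decide (m % k = 0)) = 1 :=
        (countP_div_one_iff m hm2).mpr hp
      rw [h1]
      have hno : ∀ k, 2 ≤ k → k * k ≤ m → m % k ≠ 0 := by
        intro k hk hkk hmod
        have hks : k ≤ Nat.sqrt m := Nat.le_sqrt.mpr hkk
        exact (Nat.prime_def_le_sqrt.mp hp).2 k hk hks (Nat.dvd_iff_mod_eq_zero.mpr hmod)
      rw [hB.mpr hno]
      norm_num
    · have h1 : (List.range' 2 (m - 1)).countP (fun k => decide (m % k = 0)) ≠ 1 :=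
        fun h => hp ((countP_div_one_iff m hm2).mp h)
      rw [if_neg (by exact_mod_cast h1)]
      have hne : altLoopB (m + 1) (m : Int) 2 ≠ 1 := by
        intro h
        apply hp
        refine Nat.prime_def_le_sqrt.mpr ⟨hm2, fun k hk hks hdvd => ?_⟩
        exact (hB.mp h) k hk (Nat.le_sqrt.mp hks) (Nat.dvd_iff_mod_eq_zero.mp hdvd)
      rcases altLoopB_zero_or_one (m + 1) (m : Int) 2 with h0 | h0
      · rw [h0]
      · exact absurd h0 hne

-- last four characters: the four negative indexings concatenated equal the [-4:] slice
theorem last_four (s : List Char) (h : 4 ≤ s.length) :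
    ∃ c4 c3 c2 c1,
      PySem.List.pyGet? s (-4) = some c4 ∧ PySem.List.pyGet? s (-3) = some c3 ∧
      PySem.List.pyGet? s (-2) = some c2 ∧ PySem.List.pyGet? s (-1) = some c1 ∧
      PySem.List.slice s (some (-4)) none = [c4, c3, c2, c1] := by
  have h4 : s.length - 4 < s.length := by omega
  have h3 : s.length - 3 < s.length := by omega
  have h2 : s.length - 2 < s.length := by omega
  have h1 : s.length - 1 < s.length := by omega
  refine ⟨s[s.length - 4], s[s.length - 3], s[s.length - 2], s[s.length - 1], ?_, ?_, ?_, ?_, ?_⟩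
  · rw [PySem.List.pyGet?_neg_ofNat s 4 (by omega) (by omega)]; simp [h4]
  · rw [PySem.List.pyGet?_neg_ofNat s 3 (by omega) (by omega)]; simp [h3]
  · rw [PySem.List.pyGet?_neg_ofNat s 2 (by omega) (by omega)]; simp [h2]
  · rw [PySem.List.pyGet?_neg_ofNat s 1 (by omega) (by omega)]; simp [h1]
  · rw [PySem.List.slice_from_neg_ofNat s 4 (by omega)]
    rw [List.drop_eq_getElem_cons h4]
    have e3 : s.length - 4 + 1 = s.length - 3 := by omega
    rw [e3, List.drop_eq_getElem_cons h3]
    have e2 : s.length - 3 + 1 = s.length - 2 := by omega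
    rw [e2, List.drop_eq_getElem_cons h2]
    have e1 : s.length - 2 + 1 = s.length - 1 := by omega
    rw [e1, List.drop_eq_getElem_cons h1]
    have e0 : s.length - 1 + 1 = s.length := by omega
    rw [e0, List.drop_length]

-- ===== VERDICT (by name: the statement is the Claim_ definition above) =====
theorem dcuoi_spec : Claim_equal_dcuoi := by
  intro n _hdom hpre
  unfold Spec_dcuoi dcuoi dcuoi_alt
  obtain ⟨c4, c3, c2, c1, h4, h3, h2, h1, hsl⟩ := last_four (PySem.Int.toChars n) hpre
  rw [h4, h3, h2, h1, hsl]
  change (match PySem.Int.ofChars? [c4, c3, c2, c1] with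
      | some b => if dcuoiLoopA (b - 1).toNat b 1 0 = 1 then (1 : Int) else 0
      | none => 0)
    = (match PySem.Int.ofChars? [c4, c3, c2, c1] with
      | some b => if b < 2 then (0 : Int) else altLoopB (b + 1).toNat b 2
      | none => 0)
  cases hb : PySem.Int.ofChars? [c4, c3, c2, c1] with
  | none => rfl
  | some b => exact tail_eq b

@[simp] theorem dcuoi_raises : Claim_raises_dcuoi := by
  unfold Claim_raises_dcuoi
  constructor
  · intro n _ hr hpre
    unfold Raises_dcuoi at hr
    unfold Pre_dcuoi at hpre
    omega
  · exact ⟨by decide, by decide, by decide⟩
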